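-- pv_equiv track=rewrite | github.com/Taek-D/StreamPipe | src/data/nyc_taxi.py | parse_months
-- ===== SOURCE A (Python) =====
-- from typing import Iterable, Sequence
--
-- def validate_month(month: int) -> None:
--     if not 1 <= month <= 12:
--         raise ValueError(f"Month must be between 1 and 12, got: {month}")
--
-- def parse_months(values: Sequence[str] | None) -> list[int]:
--     if not values:
--         return list(range(1, 13))
--
--     months: set[int] = set()
--     for raw in values:
--         for token in raw.split(","):
--             token = token.strip()
--             if not token:
--                 continue
--
--             if "-" in token:
--                 start_str, end_str = token.split("-", maxsplit=1)
--                 start = int(start_str)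
--                 end = int(end_str)
--                 if start > end:
--                     raise ValueError(f"Month range must be ascending, got: {token}")
--                 for month in range(start, end + 1):
--                     validate_month(month)
--                     months.add(month)
--             else:
--                 month = int(token)
--                 validate_month(month)
--                 months.add(month)
--
--     return sorted(months)
-- ===== SOURCE B (Python) =====
-- from typing import Sequence
--
-- def parse_months(values: "Sequence[str] | None") -> list:
--     if not values:
--         return list(range(1, 13))
--
--     intervals = []
--     for raw in values:
--         for token in raw.split(","):
--             token = token.strip()
--             if not token:
--                 continue
--
--             if "-" in token:
--                 start_str, end_str = token.split("-", maxsplit=1)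
--                 start = int(start_str)
--                 end = int(end_str)
--                 if start > end:
--                     raise ValueError(f"Month range must be ascending, got: {token}")
--             else:
--                 start = end = int(token)
--
--             if start < 1 or end > 12:
--                 bad = start if start < 1 else end
--                 raise ValueError(f"Month must be between 1 and 12, got: {bad}")
--             intervals.append((start, end))
--
--     return [m for m in range(1, 13) if any(lo <= m <= hi for lo, hi in intervals)]
-- ===== Notes on version B (the rewrite author's own statement) =====
-- stated objective: alternative
-- what changed: B never materialises individual months: it parses each token into a validated (start,end) interval (a single month becomes (m,m)), eliminating A's per-month expansion loop and the accumulating set, and produces the sorted output directly by testing each month 1..12 for coverage by some interval instead of calling sorted().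
import Mathlib
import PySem

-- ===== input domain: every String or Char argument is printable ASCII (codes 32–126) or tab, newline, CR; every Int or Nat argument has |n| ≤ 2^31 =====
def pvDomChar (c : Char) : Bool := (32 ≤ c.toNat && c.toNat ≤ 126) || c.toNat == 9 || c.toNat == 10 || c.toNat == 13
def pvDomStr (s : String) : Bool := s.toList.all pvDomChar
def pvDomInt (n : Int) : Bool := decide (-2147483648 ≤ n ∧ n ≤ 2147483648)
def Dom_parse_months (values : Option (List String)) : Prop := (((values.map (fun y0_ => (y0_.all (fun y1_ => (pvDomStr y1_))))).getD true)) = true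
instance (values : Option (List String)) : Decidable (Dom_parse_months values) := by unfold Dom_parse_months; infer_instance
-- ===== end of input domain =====

-- B parses each token into a validated (start,end) interval instead of expanding months into a set,
-- and builds the sorted result by testing months 1..12 for interval coverage (no sorted(), no per-month expansion);
-- same parsing/validation branch order, so both raise identically (those inputs are outside Pre_).


-- ===== PORT A =====
-- validate_month raises ValueError unless 1 ≤ m ≤ 12; ports use this Bool test, none = raise
def pmValidOK (m : Int) : Bool := decide (1 ≤ m) && decide (m ≤ 12)

-- A's inner `for month in range(start, end+1): validate_month(month); months.add(month)`
def pmAddRangeA : PySem.Set Int → List Int → Option (PySem.Set Int)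
  | months, [] => some months
  | months, m :: rest =>
    if pmValidOK m then pmAddRangeA (PySem.Set.add months m) rest else none

-- A's body for one comma-separated token
def pmTokenA (months : PySem.Set Int) (token : String) : Option (PySem.Set Int) :=
  if PySem.Str.strip token = "" then some months
  else if PySem.Str.isIn "-" (PySem.Str.strip token) then
    match PySem.Str.splitMax? (PySem.Str.strip token) "-" 1 with
    | some [s1, s2] =>
      match PySem.Int.ofStr? s1, PySem.Int.ofStr? s2 with
      | some st, some en =>
        if en < st then none
        else pmAddRangeA months (PySem.List.pyRange st (en + 1) 1)
      | _, _ => none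
    | _ => none
  else
    match PySem.Int.ofStr? (PySem.Str.strip token) with
    | some m => if pmValidOK m then some (PySem.Set.add months m) else none
    | none => none

def pmTokensA : PySem.Set Int → List String → Option (PySem.Set Int)
  | months, [] => some months
  | months, tok :: rest =>
    match pmTokenA months tok with
    | some months' => pmTokensA months' rest
    | none => none

def pmRawsA : PySem.Set Int → List String → Option (PySem.Set Int)
  | months, [] => some months
  | months, raw :: rest =>
    match pmTokensA months ((PySem.Str.split? raw ",").getD []) with
    | some months' => pmRawsA months' rest
    | none => none

def parse_months (values : Option (List String)) : List Int :=
  match values with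
  | none => PySem.List.pyRange 1 13 1
  | some vs =>
    if vs = [] then PySem.List.pyRange 1 13 1
    else
      match pmRawsA PySem.Set.empty vs with
      | some months => PySem.List.sorted months (fun x => x) false
      | none => []  -- A raises ValueError here; excluded by Pre_

-- ===== PORT B =====
-- B's `if "-" in token: … else: start = end = int(token)` — compute the (start,end) pair for one token
def pmbParse (token : String) : Option (Int × Int) :=
  if PySem.Str.isIn "-" token then
    match PySem.Str.splitMax? token "-" 1 with
    | some [s1, s2] =>
      match PySem.Int.ofStr? s1, PySem.Int.ofStr? s2 with
      | some st, some en => if st > en then none else some (st, en)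
      | _, _ => none
    | _ => none
  else
    match PySem.Int.ofStr? token with
    | some m => some (m, m)
    | none => none

-- B's per-token body: skip empty, parse, bound-check, append the interval
def pmbToken (ivs : List (Int × Int)) (token : String) : Option (List (Int × Int)) :=
  if PySem.Str.strip token = "" then some ivs
  else
    match pmbParse (PySem.Str.strip token) with
    | some (st, en) => if st < 1 ∨ 12 < en then none else some (ivs ++ [(st, en)])
    | none => none

def pmbTokens : List (Int × Int) → List String → Option (List (Int × Int))
  | ivs, [] => some ivs
  | ivs, tok :: rest =>
    match pmbToken ivs tok with
    | some ivs' => pmbTokens ivs' rest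
    | none => none

def pmbRaws : List (Int × Int) → List String → Option (List (Int × Int))
  | ivs, [] => some ivs
  | ivs, raw :: rest =>
    match pmbTokens ivs ((PySem.Str.split? raw ",").getD []) with
    | some ivs' => pmbRaws ivs' rest
    | none => none

def parse_months_alt (values : Option (List String)) : List Int :=
  match values with
  | none => PySem.List.pyRange 1 13 1
  | some vs =>
    if vs = [] then PySem.List.pyRange 1 13 1
    else
      match pmbRaws [] vs with
      | some ivs =>
        (PySem.List.pyRange 1 13 1).filter
          (fun m => ivs.any (fun p => decide (p.1 ≤ m) && decide (m ≤ p.2)))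
      | none => []  -- B raises ValueError here; excluded by Pre_

-- ===== PRECONDITION & SPEC =====
-- A raises ValueError on any stripped token that is not empty, a month 1..12, or an ascending
-- in-range month range; Pre_ admits exactly the inputs where A returns normally.
def pmTokenOK (token : String) : Bool :=
  if PySem.Str.strip token = "" then true
  else if PySem.Str.isIn "-" (PySem.Str.strip token) then
    match PySem.Str.splitMax? (PySem.Str.strip token) "-" 1 with
    | some [s1, s2] =>
      match PySem.Int.ofStr? s1, PySem.Int.ofStr? s2 with
      | some st, some en => decide (st ≤ en) && decide (1 ≤ st) && decide (en ≤ 12)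
      | _, _ => false
    | _ => false
  else
    match PySem.Int.ofStr? (PySem.Str.strip token) with
    | some m => decide (1 ≤ m) && decide (m ≤ 12)
    | none => false

def Pre_parse_months (values : Option (List String)) : Prop :=
  (match values with
   | none => true
   | some vs => vs.all (fun raw => ((PySem.Str.split? raw ",").getD []).all pmTokenOK)) = true

instance (values : Option (List String)) : Decidable (Pre_parse_months values) := by
  unfold Pre_parse_months; infer_instance

def pvWitness_parse_months : Option (List String) := some ["3-5, 1", "12"]

def Spec_parse_months (values : Option (List String)) (out : List Int) : Prop := out = parse_months_alt values
instance (values : Option (List String)) (out : List Int) : Decidable (Spec_parse_months values out) := by unfold Spec_parse_months; infer_instance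

-- ===== CLAIM (what is proved, stated in full; the proofs are below) =====
def Claim_equal_parse_months : Prop := ∀ (values : Option (List String)), Dom_parse_months values → Pre_parse_months values → Spec_parse_months values (parse_months values)

-- ===== LEMMAS AND PROOFS =====

-- Invariant: A's month set contains exactly the months covered by B's intervals, all within 1..12
def PmInv (S : PySem.Set Int) (I : List (Int × Int)) : Prop :=
  S.Nodup ∧ (∀ p ∈ I, 1 ≤ p.1 ∧ p.2 ≤ 12) ∧
  (∀ m : Int, m ∈ S ↔ ∃ p ∈ I, p.1 ≤ m ∧ m ≤ p.2)

-- A's range loop: success implies every element was valid; membership is old ∪ list; nodup kept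
lemma pmAddRangeA_spec : ∀ (L : List Int) (S S' : PySem.Set Int),
    pmAddRangeA S L = some S' →
    (∀ m ∈ L, pmValidOK m = true) ∧ (S.Nodup → S'.Nodup) ∧
    (∀ m : Int, m ∈ S' ↔ m ∈ S ∨ m ∈ L)
  | [], S, S', h => by
    simp [pmAddRangeA] at h; subst h
    exact ⟨by simp, fun h => h, by simp⟩
  | x :: rest, S, S', h => by
    simp only [pmAddRangeA] at h
    by_cases hv : pmValidOK x = true
    · rw [if_pos hv] at h
      obtain ⟨hval, hnd, hmem⟩ := pmAddRangeA_spec rest (PySem.Set.add S x) S' h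
      refine ⟨?_, fun hS => hnd (PySem.Set.nodup_add S x hS), ?_⟩
      · intro m hm
        rcases List.mem_cons.mp hm with h' | h'
        · subst h'; exact hv
        · exact hval m h'
      · intro m
        rw [hmem m, PySem.Set.mem_add]
        simp [List.mem_cons]
        tauto
    · rw [if_neg hv] at h; exact absurd h (by simp)

lemma pmInv_append {S : PySem.Set Int} {I : List (Int × Int)} (h : PmInv S I)
    {S' : PySem.Set Int} {st en : Int} (h1 : 1 ≤ st) (h2 : en ≤ 12)
    (hnd : S'.Nodup) (hmem : ∀ m : Int, m ∈ S' ↔ m ∈ S ∨ (st ≤ m ∧ m ≤ en)) :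
    PmInv S' (I ++ [(st, en)]) := by
  obtain ⟨_, hb, hm⟩ := h
  refine ⟨hnd, ?_, ?_⟩
  · intro p hp
    rcases List.mem_append.mp hp with h' | h'
    · exact hb p h'
    · simp at h'; subst h'; exact ⟨h1, h2⟩
  · intro m
    rw [hmem m, hm m]
    constructor
    · rintro (⟨p, hp, hc⟩ | hc)
      · exact ⟨p, List.mem_append_left _ hp, hc⟩
      · exact ⟨(st, en), List.mem_append_right _ (by simp), hc⟩
    · rintro ⟨p, hp, hc⟩
      rcases List.mem_append.mp hp with h' | h'
      · exact Or.inl ⟨p, h', hc⟩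
      · simp at h'; subst h'; exact Or.inr hc

lemma pmToken_par (tok : String) {S S' : PySem.Set Int} {I : List (Int × Int)}
    (h : PmInv S I) (hA : pmTokenA S tok = some S') :
    ∃ I', pmbToken I tok = some I' ∧ PmInv S' I' := by
  unfold pmTokenA at hA
  unfold pmbToken pmbParse
  by_cases h1 : PySem.Str.strip tok = ""
  · rw [if_pos h1] at hA; rw [if_pos h1]
    injection hA with heq; subst heq; exact ⟨I, rfl, h⟩
  · rw [if_neg h1] at hA; rw [if_neg h1]
    by_cases h2 : PySem.Str.isIn "-" (PySem.Str.strip tok) = true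
    · rw [if_pos h2] at hA; rw [if_pos h2]
      rcases hsp : PySem.Str.splitMax? (PySem.Str.strip tok) "-" 1 with _ | parts <;> rw [hsp] at hA
      · exact absurd hA (by simp)
      match parts with
      | [] => exact absurd hA (by simp)
      | [s1] => exact absurd hA (by simp)
      | s1 :: s2 :: s3 :: r => exact absurd hA (by simp)
      | [s1, s2] =>
        simp only at hA ⊢
        rcases h1s : PySem.Int.ofStr? s1 with _ | st <;> rw [h1s] at hA
        · exact absurd hA (by simp)
        rcases h2s : PySem.Int.ofStr? s2 with _ | en <;> rw [h2s] at hA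
        · exact absurd hA (by simp)
        dsimp only at hA ⊢
        by_cases hlt : en < st
        · rw [if_pos hlt] at hA; exact absurd hA (by simp)
        · rw [if_neg hlt] at hA
          rw [if_neg (show ¬ st > en by omega)]
          obtain ⟨hval, hnd, hmem⟩ := pmAddRangeA_spec _ _ _ hA
          have hst : pmValidOK st = true := hval st (by
            rw [PySem.List.mem_pyRange_one]; omega)
          have hen : pmValidOK en = true := hval en (by
            rw [PySem.List.mem_pyRange_one]; omega)
          have hst2 : 1 ≤ st ∧ st ≤ 12 := by simpa [pmValidOK] using hst
          have hen2 : 1 ≤ en ∧ en ≤ 12 := by simpa [pmValidOK] using hen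
          dsimp only
          rw [if_neg (by omega : ¬ (st < 1 ∨ 12 < en))]
          refine ⟨I ++ [(st, en)], rfl, pmInv_append h hst2.1 hen2.2 (hnd h.1) ?_⟩
          intro m
          rw [hmem m, PySem.List.mem_pyRange_one]
          constructor
          · rintro (h' | h') ; exact Or.inl h'; exact Or.inr ⟨h'.1, by omega⟩
          · rintro (h' | h') ; exact Or.inl h'; exact Or.inr ⟨h'.1, by omega⟩
    · rw [if_neg h2] at hA; rw [if_neg h2]
      rcases hts : PySem.Int.ofStr? (PySem.Str.strip tok) with _ | m <;> rw [hts] at hA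
      · exact absurd hA (by simp)
      · dsimp only at hA ⊢
        by_cases hv : pmValidOK m = true
        · rw [if_pos hv] at hA
          injection hA with h'; subst h'
          have hv' : 1 ≤ m ∧ m ≤ 12 := by simpa [pmValidOK] using hv
          rw [if_neg (by omega : ¬ (m < 1 ∨ 12 < m))]
          refine ⟨I ++ [(m, m)], rfl, pmInv_append h hv'.1 hv'.2
            (PySem.Set.nodup_add S m h.1) ?_⟩
          intro x
          rw [PySem.Set.mem_add]
          constructor
          · rintro (h' | h'); exact Or.inl h'; exact Or.inr (by omega)
          · rintro (h' | h'); exact Or.inl h'; exact Or.inr (by omega)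
        · rw [if_neg hv] at hA; exact absurd hA (by simp)

lemma pmTokens_par : ∀ (toks : List String) {S S' : PySem.Set Int} {I : List (Int × Int)},
    PmInv S I → pmTokensA S toks = some S' →
    ∃ I', pmbTokens I toks = some I' ∧ PmInv S' I'
  | [], S, S', I, h, hA => by
    simp [pmTokensA] at hA; subst hA; exact ⟨I, rfl, h⟩
  | tok :: rest, S, S', I, h, hA => by
    simp only [pmTokensA, pmbTokens] at hA ⊢
    rcases ht : pmTokenA S tok with _ | S₁ <;> rw [ht] at hA
    · exact absurd hA (by simp)
    · obtain ⟨I₁, hB, hInv⟩ := pmToken_par tok h ht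
      rw [hB]
      exact pmTokens_par rest hInv hA

lemma pmRaws_par : ∀ (vs : List String) {S S' : PySem.Set Int} {I : List (Int × Int)},
    PmInv S I → pmRawsA S vs = some S' →
    ∃ I', pmbRaws I vs = some I' ∧ PmInv S' I'
  | [], S, S', I, h, hA => by
    simp [pmRawsA] at hA; subst hA; exact ⟨I, rfl, h⟩
  | raw :: rest, S, S', I, h, hA => by
    simp only [pmRawsA, pmbRaws] at hA ⊢
    rcases ht : pmTokensA S ((PySem.Str.split? raw ",").getD []) with _ | S₁ <;> rw [ht] at hA
    · exact absurd hA (by simp)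
    · obtain ⟨I₁, hB, hInv⟩ := pmTokens_par _ h ht
      rw [hB]
      exact pmRaws_par rest hInv hA

-- Pre_ implies A's folds succeed
lemma pmAddRangeA_some : ∀ (L : List Int) (S : PySem.Set Int),
    (∀ m ∈ L, 1 ≤ m ∧ m ≤ 12) → ∃ S', pmAddRangeA S L = some S'
  | [], S, _ => ⟨S, rfl⟩
  | m :: rest, S, h => by
    have hm := h m (List.mem_cons_self)
    have : pmValidOK m = true := by simp [pmValidOK]; omega
    simp only [pmAddRangeA, this, if_pos]
    exact pmAddRangeA_some rest _ (fun x hx => h x (List.mem_cons_of_mem _ hx))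

lemma pmTokenA_some (tok : String) (S : PySem.Set Int) (h : pmTokenOK tok = true) :
    ∃ S', pmTokenA S tok = some S' := by
  unfold pmTokenOK at h
  unfold pmTokenA
  split_ifs at h ⊢ with h1 h2
  · exact ⟨S, rfl⟩
  · rcases hsp : PySem.Str.splitMax? (PySem.Str.strip tok) "-" 1 with _ | parts <;> rw [hsp] at h
    · exact absurd h (by simp)
    · match parts with
      | [] => exact absurd h (by simp)
      | [s1] => exact absurd h (by simp)
      | s1 :: s2 :: s3 :: r => exact absurd h (by simp)
      | [s1, s2] =>
        simp only at h ⊢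
        rcases h1s : PySem.Int.ofStr? s1 with _ | st <;> rw [h1s] at h
        · exact absurd h (by simp)
        rcases h2s : PySem.Int.ofStr? s2 with _ | en <;> rw [h2s] at h
        · exact absurd h (by simp)
        dsimp only at h ⊢
        simp only [Bool.and_eq_true, decide_eq_true_eq] at h
        rw [if_neg (by omega)]
        refine pmAddRangeA_some _ S ?_
        intro m hm
        have := PySem.List.mem_pyRange_one.mp hm
        omega
  · rcases hts : PySem.Int.ofStr? (PySem.Str.strip tok) with _ | m <;> rw [hts] at h
    · exact absurd h (by simp)
    · dsimp only at h ⊢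
      rw [if_pos (show pmValidOK m = true by simpa [pmValidOK] using h)]
      exact ⟨_, rfl⟩

lemma pmTokensA_some : ∀ (toks : List String) (S : PySem.Set Int),
    (∀ t ∈ toks, pmTokenOK t = true) → ∃ S', pmTokensA S toks = some S'
  | [], S, _ => ⟨S, rfl⟩
  | tok :: rest, S, h => by
    obtain ⟨S₁, h1⟩ := pmTokenA_some tok S (h tok (List.mem_cons_self))
    simp only [pmTokensA, h1]
    exact pmTokensA_some rest S₁ (fun t ht => h t (List.mem_cons_of_mem _ ht))

lemma pmRawsA_some : ∀ (vs : List String) (S : PySem.Set Int),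
    (∀ raw ∈ vs, ∀ t ∈ (PySem.Str.split? raw ",").getD [], pmTokenOK t = true) →
    ∃ S', pmRawsA S vs = some S'
  | [], S, _ => ⟨S, rfl⟩
  | raw :: rest, S, h => by
    obtain ⟨S₁, h1⟩ := pmTokensA_some _ S (h raw (List.mem_cons_self))
    simp only [pmRawsA, h1]
    exact pmRawsA_some rest S₁ (fun r hr => h r (List.mem_cons_of_mem _ hr))

lemma pmInv_init : PmInv PySem.Set.empty [] := by
  refine ⟨by simp [PySem.Set.empty], by simp, ?_⟩
  intro m
  simp [PySem.Set.empty]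

lemma pmInv_final {S : PySem.Set Int} {I : List (Int × Int)} (h : PmInv S I) :
    PySem.List.sorted S (fun x => x) false =
      (PySem.List.pyRange 1 13 1).filter
        (fun m => I.any (fun p => decide (p.1 ≤ m) && decide (m ≤ p.2))) := by
  obtain ⟨hnd, hb, hmem⟩ := h
  have hr : PySem.List.pyRange 1 13 1 = ([1,2,3,4,5,6,7,8,9,10,11,12] : List Int) := by decide
  set ys := (PySem.List.pyRange 1 13 1).filter
    (fun m => I.any (fun p => decide (p.1 ≤ m) && decide (m ≤ p.2))) with hys
  have hysnd : ys.Nodup := List.Nodup.filter _ (by rw [hr]; decide)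
  have hysmem : ∀ a : Int, a ∈ ys ↔ a ∈ S := by
    intro a
    rw [hys, List.mem_filter, PySem.List.mem_pyRange_one, List.any_eq_true]
    constructor
    · rintro ⟨_, p, hp, hc⟩
      simp only [Bool.and_eq_true, decide_eq_true_eq] at hc
      exact (hmem a).mpr ⟨p, hp, hc⟩
    · intro ha
      obtain ⟨p, hp, hc⟩ := (hmem a).mp ha
      have := hb p hp
      exact ⟨⟨by omega, by omega⟩, p, hp, by simp only [Bool.and_eq_true, decide_eq_true_eq]; exact hc⟩
  have hperm : ys.Perm S := (List.perm_ext_iff_of_nodup hysnd hnd).mpr (fun a => (hysmem a).trans Iff.rfl)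
  have hpw : ys.Pairwise (fun a b : Int => (fun x => x) a < (fun x => x) b) := by
    refine List.Pairwise.filter _ ?_
    rw [hr]; decide
  exact PySem.List.sorted_eq_of_perm_of_pairwise_lt S ys (fun x => x) hperm hpw

-- ===== VERDICT (by name: the statement is the Claim_ definition above) =====
theorem parse_months_spec : Claim_equal_parse_months := by
  intro values _hdom hpre
  unfold Spec_parse_months parse_months parse_months_alt
  match values with
  | none => rfl
  | some vs =>
    by_cases hvs : vs = []
    · simp [hvs]
    · simp only [if_neg hvs]
      unfold Pre_parse_months at hpre
      dsimp only at hpre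
      simp only [List.all_eq_true] at hpre
      obtain ⟨S', hA⟩ := pmRawsA_some vs PySem.Set.empty
        (fun raw hr t ht => hpre raw hr t ht)
      obtain ⟨I', hB, hInv⟩ := pmRaws_par vs pmInv_init hA
      rw [hA, hB]
      exact pmInv_final hInv
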